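-- pv_equiv track=rewrite | github.com/SriVarshini09/RAG-truth | agents/decision_aggregator.py | _find_best_span
-- ===== SOURCE A (Python) =====
-- def _find_best_span(keywords: list, response: str) -> str:
--     """Find the longest contiguous phrase in response that matches keywords."""
--     if not keywords:
--         return ""
--
--     response_lower = response.lower()
--     words = response_lower.split()
--     response_words = response.split()
--
--     best = ""
--     window = min(len(keywords) + 3, len(words))
--
--     for start in range(len(words)):
--         for end in range(start + 1, min(start + window + 1, len(words) + 1)):
--             window_lower = " ".join(words[start:end])
--             match_count = sum(1 for kw in keywords if kw in window_lower)
--             if match_count >= max(1, len(keywords) // 2):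
--                 candidate = " ".join(response_words[start:end])
--                 if len(candidate) > len(best):
--                     best = candidate
--
--     return best
-- ===== SOURCE B (Python) =====
-- def _find_best_span(keywords: list, response: str) -> str:
--     """Find the longest contiguous phrase in response that matches keywords.
--
--     Substring matches are monotone as a window grows to the right, and the
--     candidate only gets longer, so for each start position only the largest
--     window needs to be examined.
--     """
--     if not keywords:
--         return ""
--
--     words = response.lower().split()
--     response_words = response.split()
--     n = len(words)
--     window = min(len(keywords) + 3, n)
--     threshold = max(1, len(keywords) // 2)
--
--     best = ""
--     for start in range(n):
--         end = min(start + window, n)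
--         window_lower = " ".join(words[start:end])
--         if sum(kw in window_lower for kw in keywords) >= threshold:
--             candidate = " ".join(response_words[start:end])
--             if len(candidate) > len(best):
--                 best = candidate
--     return best
-- ===== Notes on version B (the rewrite author's own statement) =====
-- stated objective: alternative
-- what changed: B exploits that substring matches and candidate length are monotone as a window grows to the right, so per start position it evaluates only the single largest window, replacing A's inner loop over all window sizes.
import Mathlib
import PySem

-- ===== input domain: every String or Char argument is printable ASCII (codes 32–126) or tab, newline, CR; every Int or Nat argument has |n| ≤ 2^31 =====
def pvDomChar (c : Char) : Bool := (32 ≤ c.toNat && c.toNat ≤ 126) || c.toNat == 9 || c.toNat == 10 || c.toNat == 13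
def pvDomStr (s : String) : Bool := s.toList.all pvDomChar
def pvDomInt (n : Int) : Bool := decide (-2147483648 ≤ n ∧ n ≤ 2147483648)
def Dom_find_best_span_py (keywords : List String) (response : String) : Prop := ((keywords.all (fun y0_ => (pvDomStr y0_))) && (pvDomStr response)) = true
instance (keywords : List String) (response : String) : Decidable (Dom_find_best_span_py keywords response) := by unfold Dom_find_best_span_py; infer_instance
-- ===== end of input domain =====

-- B replaces A's inner loop over window sizes by a single check of the largest window
-- per start (substring matches and candidate length are monotone in the window's right end).

-- ===== PORT A =====
def find_best_span_py (keywords : List String) (response : String) : String :=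
  if keywords = [] then "" else
    let response_lower := PySem.Str.lower response
    let words := PySem.Str.split₀ response_lower
    let response_words := PySem.Str.split₀ response
    let window : Int := min ((keywords.length : Int) + 3) (words.length : Int)
    (PySem.List.pyRange 0 (words.length : Int)).foldl (fun best start =>
      (PySem.List.pyRange (start + 1) (min (start + window + 1) ((words.length : Int) + 1))).foldl
        (fun best end_ =>
          let window_lower := PySem.Str.join " " (PySem.List.slice words (some start) (some end_))
          let match_count : Int := keywords.foldl
            (fun acc kw => if PySem.Str.isIn kw window_lower then acc + 1 else acc) 0
          if match_count ≥ max 1 (PySem.Int.floordiv (keywords.length : Int) 2) then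
            let candidate := PySem.Str.join " " (PySem.List.slice response_words (some start) (some end_))
            if PySem.Str.len candidate > PySem.Str.len best then candidate else best
          else best)
        best) ""

-- ===== PORT B =====
def find_best_span_py_alt (keywords : List String) (response : String) : String :=
  if keywords = [] then "" else
    let words := PySem.Str.split₀ (PySem.Str.lower response)
    let response_words := PySem.Str.split₀ response
    let n := words.length
    let window := min (keywords.length + 3) n
    let threshold : Int := max 1 (PySem.Int.floordiv (keywords.length : Int) 2)
    (List.range n).foldl (fun best start =>
      let end_ := min (start + window) n
      let window_lower := PySem.Str.join " " (PySem.List.slice words (some (start : Int)) (some (end_ : Int)))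
      if ((keywords.countP (fun kw => PySem.Str.isIn kw window_lower)) : Int) ≥ threshold then
        let candidate := PySem.Str.join " " (PySem.List.slice response_words (some (start : Int)) (some (end_ : Int)))
        if PySem.Str.len candidate > PySem.Str.len best then candidate else best
      else best) ""

-- ===== PRECONDITION & SPEC =====
def Spec_find_best_span_py (keywords : List String) (response : String) (out : String) : Prop := out = find_best_span_py_alt keywords response
instance (keywords : List String) (response : String) (out : String) : Decidable (Spec_find_best_span_py keywords response out) := by unfold Spec_find_best_span_py; infer_instance

-- ===== CLAIM (what is proved, stated in full; the proofs are below) =====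
def Claim_equal_find_best_span_py : Prop := ∀ (keywords : List String) (response : String), Dom_find_best_span_py keywords response → Spec_find_best_span_py keywords response (find_best_span_py keywords response)

-- ===== LEMMAS AND PROOFS =====

-- slices with the same start are prefixes of one another as the right end grows
theorem pv_slice_prefix {α : Type} (xs : List α) (a e e' : Int)
    (h0 : 0 ≤ a) (he : 0 ≤ e) (h2 : e ≤ e') :
    PySem.List.slice xs (some a) (some e) <+: PySem.List.slice xs (some a) (some e') := by
  have h0' : a = (a.toNat : Int) := (Int.toNat_of_nonneg h0).symm
  have he' : e = (e.toNat : Int) := (Int.toNat_of_nonneg he).symm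
  have he2 : e' = (e'.toNat : Int) := (Int.toNat_of_nonneg (le_trans he h2)).symm
  rw [h0', he', he2, PySem.List.slice_natCast, PySem.List.slice_natCast]
  exact List.take_prefix_take_left (by omega)

theorem pv_join_append_prefix (sep : List Char) (l t : List (List Char)) :
    PySem.Chars.join sep l <+: PySem.Chars.join sep (l ++ t) := by
  induction l with
  | nil => simp [PySem.Chars.join_nil]
  | cons p l ih =>
    cases l with
    | nil =>
      cases t with
      | nil => simp
      | cons q rest =>
        rw [PySem.Chars.join_singleton]
        simp only [List.cons_append, List.nil_append]
        rw [PySem.Chars.join_cons_cons]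
        simpa only [List.append_assoc] using
          List.prefix_append p (sep ++ PySem.Chars.join sep (q :: rest))
    | cons p2 l2 =>
      simp only [List.cons_append]
      rw [PySem.Chars.join_cons_cons, PySem.Chars.join_cons_cons]
      exact (List.prefix_append_right_inj (p ++ sep)).mpr (by simpa using ih)

theorem pv_join_prefix (l l' : List String) (h : l <+: l') :
    (PySem.Str.join " " l).toList <+: (PySem.Str.join " " l').toList := by
  obtain ⟨t, rfl⟩ := h
  rw [PySem.Str.toList_join, PySem.Str.toList_join, List.map_append]
  exact pv_join_append_prefix _ _ _

-- the running "keep the longer" update collapses along a prefix chain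
theorem pv_upd_prefix (x y b : String) (h : x.toList <+: y.toList) :
    (if PySem.Str.len y > PySem.Str.len (if PySem.Str.len x > PySem.Str.len b then x else b)
      then y else (if PySem.Str.len x > PySem.Str.len b then x else b))
    = if PySem.Str.len y > PySem.Str.len b then y else b := by
  rcases eq_or_lt_of_le h.length_le with heq | hlt
  · have hxy : x = y := by
      have h2 := h.eq_of_length heq
      exact String.toList_inj.mp h2
    subst hxy
    split_ifs <;> rfl
  · split_ifs <;> first | rfl | (exfalso; simp only [PySem.Str.len_eq] at *; omega)

theorem pv_collapse (q : Int → Prop) [DecidablePred q] (c : Int → String) (E : Int) :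
    ∀ (k : Nat) (a : Int), a + k = E →
      (∀ e, a ≤ e → e ≤ E → q e → q E) →
      (∀ e, a ≤ e → e ≤ E → (c e).toList <+: (c E).toList) →
      ∀ b : String,
        (PySem.List.pyRange a (E + 1)).foldl
          (fun best e => if q e then (if PySem.Str.len (c e) > PySem.Str.len best then c e else best) else best) b
        = if q E then (if PySem.Str.len (c E) > PySem.Str.len b then c E else b) else b := by
  intro k
  induction k with
  | zero =>
    intro a ha _ _ b
    have haE : a = E := by omega
    subst haE
    rw [PySem.List.pyRange_one_cons (by omega)]
    rw [show PySem.List.pyRange (a + 1) (a + 1) = [] from by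
      simp [PySem.List.pyRange]]
    rfl
  | succ k ih =>
    intro a ha hq hc b
    have haE : a < E := by omega
    rw [PySem.List.pyRange_one_cons (by omega)]
    simp only [List.foldl_cons]
    rw [ih (a + 1) (by omega) (fun e h1 h2 => hq e (by omega) h2)
        (fun e h1 h2 => hc e (by omega) h2)]
    by_cases hqE : q E
    · rw [if_pos hqE, if_pos hqE]
      by_cases hqa : q a
      · rw [if_pos hqa]
        exact pv_upd_prefix (c a) (c E) b (hc a (by omega) (by omega))
      · rw [if_neg hqa]
    · have hqa : ¬ q a := fun h => hqE (hq a (by omega) (by omega) h)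
      rw [if_neg hqa, if_neg hqE]

theorem pv_count_mono (kws : List String) (w w' : String) (h : w.toList <+: w'.toList) :
    kws.countP (fun kw => PySem.Str.isIn kw w) ≤ kws.countP (fun kw => PySem.Str.isIn kw w') := by
  apply List.countP_mono_left
  intro kw _ hin
  simp only [PySem.Str.isIn_iff_infix] at *
  exact hin.trans h.isInfix

-- ===== VERDICT (by name: the statement is the Claim_ definition above) =====
theorem find_best_span_py_spec : Claim_equal_find_best_span_py := by
  intro keywords response _
  unfold Spec_find_best_span_py
  by_cases hk : keywords = []
  · simp [find_best_span_py, find_best_span_py_alt, hk]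
  · have hk1 : 1 ≤ keywords.length := List.length_pos_of_ne_nil hk
    simp only [find_best_span_py, find_best_span_py_alt, if_neg hk]
    rw [PySem.List.pyRange_zero_natCast, List.foldl_map]
    apply PySem.List.foldl_congr_mem
    intro b s hs
    rw [List.mem_range] at hs
    set ws := PySem.Str.split₀ (PySem.Str.lower response) with hws
    set rs := PySem.Str.split₀ response with hrs
    set n := ws.length with hn
    set Enat := min (s + min (keywords.length + 3) n) n with hEnat
    have hE : min ((s : Int) + min ((keywords.length : Int) + 3) (n : Int) + 1) ((n : Int) + 1)
        = (Enat : Int) + 1 := by omega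
    rw [hE]
    simp only [PySem.List.foldl_if_add_one, zero_add, ge_iff_le]
    have hk1' : 1 ≤ keywords.length := hk1
    have hcoll := pv_collapse
      (q := fun e => max 1 (PySem.Int.floordiv (keywords.length : Int) 2)
        ≤ ((keywords.countP (fun kw => PySem.Str.isIn kw
              (PySem.Str.join " " (PySem.List.slice ws (some (s : Int)) (some e))))) : Int))
      (c := fun e => PySem.Str.join " " (PySem.List.slice rs (some (s : Int)) (some e)))
      ((Enat : Int))
      (Enat - s - 1) ((s : Int) + 1)
      (by omega)
      (by
        intro e h1 h2 hqe
        refine le_trans hqe ?_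
        have := pv_count_mono keywords
          (PySem.Str.join " " (PySem.List.slice ws (some (s : Int)) (some e)))
          (PySem.Str.join " " (PySem.List.slice ws (some (s : Int)) (some (Enat : Int))))
          (pv_join_prefix _ _ (pv_slice_prefix ws _ e _ (Int.natCast_nonneg s) (by omega) h2))
        exact_mod_cast this)
      (by
        intro e h1 h2
        exact pv_join_prefix _ _ (pv_slice_prefix rs _ e _ (Int.natCast_nonneg s) (by omega) h2))
      b
    exact hcoll
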